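-- pv_equiv track=rewrite | github.com/iGurcannn/repo_deneme | my_first_project.py | count_children
-- ===== SOURCE A (Python) =====
-- def is_child(parent,child):
--     my_count = 0
--     changeabale_O = []
--
--     for i in range(len(parent)):
--         if parent[i] != child[i]:
--             my_count += 1
--             changeabale_O.append(i)
--
--     if len(changeabale_O) != 1:
--         return False
--
--     i = changeabale_O[0]
--
--     if parent[i] != "O" or child[i] != "X":
--         return False
--
--     my_left = i > 0 and parent[i - 1] == "X"
--     my_right = i < len(parent) - 1 and parent[i + 1] == "X"
--
--     if my_left or my_right:
--         return True
--
--
--     return False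
--
-- def count_children(L):
--     my_dict = {}
--
--     for p in L:
--         count = 0
--
--         for c in L:
--             if is_child(p, c):
--                 count += 1
--
--         my_dict[p] = count
--
--     return my_dict
--
-- L = [
--  "OOXOO",
--  "OOXXO",
--  "OXXOO",
--  "OOXXX",
--  "OXXXO",
--  "XXXOO",
--  "OXXXX",
--  "XXXXO",
--  "XXXXX",
--  "OXOXO"
-- ]
-- ===== SOURCE B (Python) =====
-- def count_children(L):
--     # One pass builds a multiplicity table; for each parent we generate its
--     # eligible O->X children directly and sum their multiplicities, instead of
--     # testing every (parent, child) pair character by character.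
--     cnt = {}
--     for s in L:
--         cnt[s] = cnt.get(s, 0) + 1
--     res = {}
--     for p in L:
--         total = 0
--         n = len(p)
--         for i in range(n):
--             if p[i] == 'O' and ((i > 0 and p[i-1] == 'X') or (i < n - 1 and p[i+1] == 'X')):
--                 total += cnt.get(p[:i] + 'X' + p[i+1:], 0)
--         res[p] = total
--     return res
-- ===== Notes on version B (the rewrite author's own statement) =====
-- stated objective: faster
-- what changed: Instead of testing every (parent, child) pair character by character, B builds a multiplicity table of the strings in one pass and, for each parent, generates its eligible O->X children directly and sums their multiplicities.
import Mathlib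
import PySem

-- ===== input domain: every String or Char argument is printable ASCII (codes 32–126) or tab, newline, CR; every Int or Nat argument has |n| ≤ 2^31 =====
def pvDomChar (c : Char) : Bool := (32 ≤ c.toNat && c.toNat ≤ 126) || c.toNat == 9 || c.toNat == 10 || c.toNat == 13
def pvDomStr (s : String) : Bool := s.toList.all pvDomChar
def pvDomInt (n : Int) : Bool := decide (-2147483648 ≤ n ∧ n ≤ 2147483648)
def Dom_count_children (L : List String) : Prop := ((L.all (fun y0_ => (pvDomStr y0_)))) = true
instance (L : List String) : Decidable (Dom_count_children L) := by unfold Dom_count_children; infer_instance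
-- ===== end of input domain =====

-- B replaces A's all-pairs character-by-character test by a multiplicity table plus direct
-- generation of each parent's eligible O→X children (asymptotically fewer string comparisons).

-- ===== PORT A =====
-- Transliteration of is_child. parent[i] with 0 ≤ i < len(parent) is exact as List.getD;
-- child[i] raises IndexError when i ≥ len(child) — exactly those inputs are excluded by
-- Pre_count_children, inside which getD is exact. range(len(parent)) = List.range (exact, len ≥ 0).
def isChild (parent child : String) : Bool :=
  let P := parent.toList
  let C := child.toList
  let st := (List.range P.length).foldl
      (fun (st : Int × List Nat) i =>
        if P.getD i ' ' ≠ C.getD i ' ' then (st.1 + 1, st.2 ++ [i]) else st)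
      ((0 : Int), ([] : List Nat))
  if st.2.length ≠ 1 then false
  else
    let i := st.2.getD 0 0
    if P.getD i ' ' ≠ 'O' ∨ C.getD i ' ' ≠ 'X' then false
    else
      let left := decide (0 < i) && (P.getD (i - 1) ' ' == 'X')
      let right := decide (i + 1 < P.length) && (P.getD (i + 1) ' ' == 'X')
      left || right

def count_children (L : List String) : List (String × Int) :=
  (L.foldl (fun (d : PySem.Dict String Int) p =>
      d.insert p (L.foldl (fun c q => if isChild p q then c + 1 else c) (0 : Int)))
    PySem.Dict.empty).items

-- ===== PORT B =====
-- p[:i] + 'X' + p[i+1:] with 0 ≤ i < len(p): the nonnegative in-range slices are take/drop (exact).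
def childAt (P : List Char) (i : Nat) : String := String.ofList (P.take i ++ 'X' :: P.drop (i + 1))

-- the eligibility test of Source B's inner loop, as a named helper
def eligB (P : List Char) (i : Nat) : Bool :=
  P.getD i ' ' == 'O' &&
    ((decide (0 < i) && (P.getD (i - 1) ' ' == 'X')) ||
     (decide (i + 1 < P.length) && (P.getD (i + 1) ' ' == 'X')))

def count_children_alt (L : List String) : List (String × Int) :=
  let cnt := L.foldl (fun (d : PySem.Dict String Int) s => d.modify s 0 (· + 1)) PySem.Dict.empty
  (L.foldl (fun (d : PySem.Dict String Int) p =>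
      let P := p.toList
      d.insert p ((List.range P.length).foldl
        (fun t i => if eligB P i then t + cnt.getD (childAt P i) 0 else t) (0 : Int)))
    PySem.Dict.empty).items

-- ===== PRECONDITION & SPEC =====
-- Pre_ excludes exactly the inputs on which A raises: whenever two strings of L have different
-- lengths, is_child(longer, shorter) hits child[i] out of range (IndexError).
def Pre_count_children (L : List String) : Prop :=
  ∀ p ∈ L, ∀ q ∈ L, q.toList.length = p.toList.length
instance (L : List String) : Decidable (Pre_count_children L) := by
  unfold Pre_count_children; infer_instance

def pvWitness_count_children : List String := ["OX", "XX", "OX"]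

def Spec_count_children (L : List String) (out : List (String × Int)) : Prop := out = count_children_alt L
instance (L : List String) (out : List (String × Int)) : Decidable (Spec_count_children L out) := by unfold Spec_count_children; infer_instance

-- ===== CLAIM (what is proved, stated in full; the proofs are below) =====
def Claim_equal_count_children : Prop := ∀ (L : List String), Dom_count_children L → Pre_count_children L → Spec_count_children L (count_children L)

-- ===== LEMMAS AND PROOFS =====

-- the list of positions where parent and child differ, as computed by is_child's first loop
def diffs (P C : List Char) : List Nat :=
  (List.range P.length).filter (fun j => decide (P.getD j ' ' ≠ C.getD j ' '))

lemma snd_foldl_eq_diffs (P C : List Char) :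
    ((List.range P.length).foldl
      (fun (st : Int × List Nat) i =>
        if P.getD i ' ' ≠ C.getD i ' ' then (st.1 + 1, st.2 ++ [i]) else st)
      ((0 : Int), ([] : List Nat))).2 = diffs P C := by
  have hcongr := PySem.List.foldl_congr_mem
      (l := List.range P.length)
      (init := ((0 : Int), ([] : List Nat)))
      (f := fun (st : Int × List Nat) i =>
        if P.getD i ' ' ≠ C.getD i ' ' then (st.1 + 1, st.2 ++ [i]) else st)
      (g := fun (st : Int × List Nat) i =>
        ((if P.getD i ' ' ≠ C.getD i ' ' then st.1 + 1 else st.1),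
         (if P.getD i ' ' ≠ C.getD i ' ' then st.2 ++ [i] else st.2)))
      (by
        intro acc x _
        by_cases hc : P.getD x ' ' = C.getD x ' ' <;>
          · simp only [List.getD_eq_getElem?_getD] at hc
            simp [hc])
  rw [hcongr]
  rw [PySem.List.foldl_prod_mk
      (f := fun (a : Int) i => if P.getD i ' ' ≠ C.getD i ' ' then a + 1 else a)
      (g := fun (a : List Nat) i => if P.getD i ' ' ≠ C.getD i ' ' then a ++ [i] else a)]
  simpa [diffs] using PySem.List.foldl_append_ite_eq_filter
    (p := fun j => P.getD j ' ' ≠ C.getD j ' ') (l := List.range P.length) (acc := [])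

lemma eligB_lt {P : List Char} {i : Nat} (h : eligB P i = true) : i < P.length := by
  by_contra hge
  have hd : P[i]? = none := List.getElem?_eq_none (by omega)
  simp [eligB, List.getD_eq_getElem?_getD, hd] at h

lemma length_child {P : List Char} {i : Nat} (hi : i < P.length) :
    (P.take i ++ 'X' :: P.drop (i + 1)).length = P.length := by
  simp; omega

lemma child_getD_self {P : List Char} {i : Nat} (hi : i < P.length) :
    (P.take i ++ 'X' :: P.drop (i + 1)).getD i ' ' = 'X' := by
  have ht : (P.take i).length = i := by simp; omega
  rw [List.getD_eq_getElem?_getD, List.getElem?_append_right (by omega)]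
  simp [ht]

lemma child_getD_ne {P : List Char} {i j : Nat} (hi : i < P.length) (hj : j < P.length)
    (hne : j ≠ i) : (P.take i ++ 'X' :: P.drop (i + 1)).getD j ' ' = P.getD j ' ' := by
  have ht : (P.take i).length = i := by simp; omega
  rcases Nat.lt_or_ge j i with hlt | hge
  · rw [List.getD_eq_getElem?_getD, List.getElem?_append_left (by omega)]
    simp [List.getElem?_take, hlt, List.getD_eq_getElem?_getD]
  · have hgt : i < j := by omega
    rw [List.getD_eq_getElem?_getD, List.getElem?_append_right (by omega), ht]
    have : j - i = (j - i - 1) + 1 := by omega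
    rw [this]
    simp only [List.getElem?_cons_succ]
    rw [List.getElem?_drop]
    have : i + 1 + (j - i - 1) = j := by omega
    rw [this, List.getD_eq_getElem?_getD]

lemma filter_range_eq_singleton {p : Nat → Bool} {i : Nat} (hp : p i = true) :
    ∀ n, i < n → (∀ j, j < n → j ≠ i → p j = false) → (List.range n).filter p = [i] := by
  intro n
  induction n with
  | zero => omega
  | succ m ih =>
    intro hi h
    rw [List.range_succ, List.filter_append]
    by_cases him : i = m
    · subst him
      have hnil : (List.range i).filter p = [] := by
        apply List.filter_eq_nil_iff.mpr
        intro j hj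
        simp only [List.mem_range] at hj
        simp [h j (by omega) (by omega)]
      simp [hnil, hp]
    · have hi' : i < m := by omega
      rw [ih hi' (fun j hj hne => h j (by omega) hne)]
      simp [h m (by omega) (by omega)]

lemma mem_diffs {P C : List Char} {j : Nat} :
    j ∈ diffs P C ↔ j < P.length ∧ P.getD j ' ' ≠ C.getD j ' ' := by
  simp [diffs, List.mem_filter, List.mem_range]

-- q = childAt P i (with eligB) pins the diff list to [i]
lemma diffs_of_child {P C : List Char} {i : Nat} (hi : i < P.length)
    (hO : P.getD i ' ' = 'O') (hC : C = P.take i ++ 'X' :: P.drop (i + 1)) :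
    diffs P C = [i] := by
  subst hC
  refine filter_range_eq_singleton ?_ _ hi ?_
  · rw [decide_eq_true_eq, child_getD_self hi, hO]
    simp
  · intro j hj hne
    rw [decide_eq_false_iff_not, child_getD_ne hi hj hne]
    simp

-- conversely, diff list [i] plus the two character checks forces q = childAt P i
lemma child_of_diffs {P C : List Char} {i : Nat} (hlen : C.length = P.length)
    (hd : diffs P C = [i]) (hX : C.getD i ' ' = 'X') :
    C = P.take i ++ 'X' :: P.drop (i + 1) := by
  have hi : i < P.length := (mem_diffs.mp (by rw [hd]; exact List.mem_singleton_self i)).1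
  have hag : ∀ j, j < P.length → j ≠ i → C.getD j ' ' = P.getD j ' ' := by
    intro j hj hne
    by_contra hne'
    have hmem : j ∈ diffs P C := mem_diffs.mpr ⟨hj, fun h => hne' h.symm⟩
    rw [hd, List.mem_singleton] at hmem
    exact hne hmem
  apply List.ext_getElem (by rw [hlen, length_child hi])
  intro j hj1 hj2
  have hjP : j < P.length := hlen ▸ hj1
  by_cases hji : j = i
  · subst hji
    rw [← List.getD_eq_getElem C ' ' hj1, ← List.getD_eq_getElem _ ' ' hj2, hX,
      child_getD_self hjP]
  · rw [← List.getD_eq_getElem C ' ' hj1, ← List.getD_eq_getElem _ ' ' hj2,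
      child_getD_ne hi hjP hji, hag j hjP hji]

lemma isChild_iff {p q : String} (hlen : q.toList.length = p.toList.length) :
    isChild p q = true ↔ ∃ i, eligB p.toList i = true ∧ q = childAt p.toList i := by
  unfold isChild
  simp only [snd_foldl_eq_diffs]
  set P := p.toList with hP
  set C := q.toList with hC
  constructor
  · intro h
    by_cases h1 : (diffs P C).length = 1
    · rw [if_neg (by simpa using h1)] at h
      set i := (diffs P C).getD 0 0 with hi0
      by_cases h2 : P.getD i ' ' ≠ 'O' ∨ C.getD i ' ' ≠ 'X'
      · rw [if_pos h2] at h; cases h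
      · rw [if_neg h2] at h
        have hO : P.getD i ' ' = 'O' := by by_contra hc; exact h2 (Or.inl hc)
        have hXc : C.getD i ' ' = 'X' := by by_contra hc; exact h2 (Or.inr hc)
        have hd : diffs P C = [i] := by
          rcases hdd : diffs P C with _ | ⟨a, t⟩
          · rw [hdd] at h1; simp at h1
          · rcases t with _ | ⟨b, t⟩
            · rw [hi0, hdd]; simp
            · rw [hdd] at h1; simp at h1
        have hi : i < P.length := (mem_diffs.mp (by rw [hd]; exact List.mem_singleton_self i)).1
        refine ⟨i, ?_, ?_⟩
        · simp only [eligB, Bool.and_eq_true, beq_iff_eq]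
          exact ⟨hO, h⟩
        · have hcl : C = P.take i ++ 'X' :: P.drop (i + 1) :=
            child_of_diffs hlen hd hXc
          apply String.toList_inj.mp
          rw [← hC, hcl]
          simp [childAt]
    · rw [if_pos (by simpa using h1)] at h
      cases h
  · rintro ⟨i, helig, hq⟩
    have hi : i < P.length := eligB_lt helig
    simp only [eligB, Bool.and_eq_true, beq_iff_eq] at helig
    obtain ⟨hO, hnb⟩ := helig
    have hCl : C = P.take i ++ 'X' :: P.drop (i + 1) := by
      rw [hC, hq]; simp [childAt]
    have hd : diffs P C = [i] := diffs_of_child hi hO hCl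
    have hX : C.getD i ' ' = 'X' := by rw [hCl]; exact child_getD_self hi
    rw [hd]
    simp only [List.length_cons, List.length_nil, List.getD_cons_zero]
    rw [if_neg (by simp)]
    rw [if_neg (by intro hc; rcases hc with hc | hc; exact hc hO; exact hc hX)]
    exact hnb

lemma child_inj {P : List Char} {i j : Nat} (hi : eligB P i = true) (hj : eligB P j = true)
    (h : childAt P i = childAt P j) : i = j := by
  by_contra hne
  have hi' := eligB_lt hi
  have hj' := eligB_lt hj
  have hjO : P.getD j ' ' = 'O' := by
    simp only [eligB, Bool.and_eq_true, beq_iff_eq] at hj; exact hj.1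
  have hl : (P.take i ++ 'X' :: P.drop (i + 1)) = (P.take j ++ 'X' :: P.drop (j + 1)) := by
    have := congrArg String.toList h
    simpa [childAt] using this
  have h1 : (P.take i ++ 'X' :: P.drop (i + 1)).getD i ' ' = 'X' := child_getD_self hi'
  have h2 : (P.take j ++ 'X' :: P.drop (j + 1)).getD i ' ' = P.getD i ' ' :=
    child_getD_ne hj' hi' hne
  rw [hl, h2] at h1
  simp only [eligB, Bool.and_eq_true, beq_iff_eq] at hi
  rw [hi.1] at h1
  simp at h1

lemma sum_ite_one_unique {Q : Nat → Prop} [DecidablePred Q] :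
    ∀ (l : List Nat), l.Nodup → (∀ i ∈ l, ∀ j ∈ l, Q i → Q j → i = j) →
      (l.map (fun i => if Q i then (1 : Int) else 0)).sum = if ∃ i ∈ l, Q i then 1 else 0
  | [], _, _ => by simp
  | a :: l, hnd, hu => by
    simp only [List.map_cons, List.sum_cons]
    by_cases ha : Q a
    · have hz : (l.map (fun i => if Q i then (1 : Int) else 0)).sum = 0 := by
        apply List.sum_eq_zero
        intro x hx
        simp only [List.mem_map] at hx
        obtain ⟨j, hj, hxe⟩ := hx
        have : ¬ Q j := by
          intro hQj
          have := hu j (by simp [hj]) a (by simp) hQj ha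
          subst this
          exact (List.nodup_cons.mp hnd).1 hj
        simp [this] at hxe
        omega
      rw [hz]
      simp [ha]
    · rw [if_neg ha]
      rw [sum_ite_one_unique l (List.nodup_cons.mp hnd).2
        (fun i hi j hj => hu i (by simp [hi]) j (by simp [hj]))]
      simp [ha]

lemma core (p : String) : ∀ (L : List String), (∀ q ∈ L, q.toList.length = p.toList.length) →
    (L.countP (fun q => isChild p q) : Int) =
      (((List.range p.toList.length).filter (eligB p.toList)).map
        (fun i => (L.count (childAt p.toList i) : Int))).sum
  | [], _ => by
    simp only [List.countP_nil, List.count_nil, Nat.cast_zero]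
    rw [List.sum_eq_zero] <;> simp
  | q :: L, h => by
    have hq := h q (by simp)
    have IH := core p L (fun r hr => h r (by simp [hr]))
    simp only [List.countP_cons, List.count_cons]
    push_cast
    have hind :
        (((List.range p.toList.length).filter (eligB p.toList)).map
          (fun i => if q == childAt p.toList i then (1 : Int) else 0)).sum =
        if isChild p q = true then 1 else 0 := by
      have huniq : ∀ i ∈ (List.range p.toList.length).filter (eligB p.toList),
          ∀ j ∈ (List.range p.toList.length).filter (eligB p.toList),
          (q == childAt p.toList i) = true → (q == childAt p.toList j) = true → i = j := by
        intro i hi j hj hqi hqj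
        simp only [List.mem_filter] at hi hj
        refine child_inj hi.2 hj.2 ?_
        rw [← beq_iff_eq.mp hqi, ← beq_iff_eq.mp hqj]
      have hiff : (∃ i ∈ (List.range p.toList.length).filter (eligB p.toList),
          (q == childAt p.toList i) = true) ↔ isChild p q = true := by
        rw [isChild_iff hq]
        constructor
        · rintro ⟨i, hiF, hqe⟩
          exact ⟨i, (List.mem_filter.mp hiF).2, beq_iff_eq.mp hqe⟩
        · rintro ⟨i, he, hqe⟩
          exact ⟨i, List.mem_filter.mpr ⟨List.mem_range.mpr (eligB_lt he), he⟩,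
            beq_iff_eq.mpr hqe⟩
      rw [sum_ite_one_unique (Q := fun i => (q == childAt p.toList i : Bool))
        ((List.range p.toList.length).filter (eligB p.toList))
        (List.Nodup.filter _ (List.nodup_range)) huniq]
      by_cases hic : isChild p q = true
      · rw [if_pos hic, if_pos (hiff.mpr hic)]
      · rw [if_neg hic, if_neg (fun hx => hic (hiff.mp hx))]
    rw [IH, hind.symm]
    rw [← List.sum_map_add]

-- ===== VERDICT (by name: the statement is the Claim_ definition above) =====
theorem count_children_spec : Claim_equal_count_children := by
  intro L hdom hpre
  show count_children L = count_children_alt L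
  unfold count_children count_children_alt
  simp only []
  congr 1
  apply PySem.List.foldl_congr_mem
  intro d p hp
  congr 1
  rw [PySem.List.foldl_if_add_one (p := fun q => isChild p q)]
  rw [PySem.List.foldl_if_eq_foldl_filter, PySem.List.foldl_add]
  rw [← PySem.Dict.counter_eq_foldl]
  simp only [PySem.Dict.getD_counter]
  rw [core p L (fun q hq => hpre p hp q hq)]
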